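-- pv_equiv track=rewrite | github.com/tinavo58/payroll-hr-related-projects | automated-tasks/options_issue v2.py | divide_tranche
-- ===== SOURCE A (Python) =====
-- def divide_tranche(col):
--     t1, t2, t3 = [], [], []
--     for _ in col:
--         a = _ // 3
--         if _ % 3 == 1:
--             t1.append(a)
--             t2.append(a)
--             t3.append(a+1)
--         elif _ % 3 == 2:
--             t1.append(a+1)
--             t2.append(a+1)
--             t3.append(a)
--         else:
--             t1.append(a)
--             t2.append(a)
--             t3.append(a)
--     return t1, t2, t3
-- ===== SOURCE B (Python) =====
-- def divide_tranche(col):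
--     t1 = [(v + 1) // 3 for v in col]
--     t3 = [v - 2 * a for v, a in zip(col, t1)]
--     return t1, t1[:], t3
-- ===== Notes on version B (the rewrite author's own statement) =====
-- stated objective: simpler
-- what changed: Eliminates the remainder case analysis: t1 and t2 are the single closed form (v+1)//3 (shared, no branch on v%3), and t3 is recovered arithmetically as v - 2*t1 from the invariant that the three tranches sum to v.
import Mathlib
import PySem

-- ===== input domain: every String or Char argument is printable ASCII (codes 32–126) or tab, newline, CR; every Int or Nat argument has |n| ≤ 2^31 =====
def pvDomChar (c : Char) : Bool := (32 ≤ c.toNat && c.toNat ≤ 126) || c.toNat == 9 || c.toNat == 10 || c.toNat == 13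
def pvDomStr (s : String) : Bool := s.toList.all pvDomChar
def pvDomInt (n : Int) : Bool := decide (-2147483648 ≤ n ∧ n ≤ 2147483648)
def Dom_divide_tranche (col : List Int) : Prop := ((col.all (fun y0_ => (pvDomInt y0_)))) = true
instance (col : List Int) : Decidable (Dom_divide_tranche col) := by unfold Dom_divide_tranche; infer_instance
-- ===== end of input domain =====

-- B drops the remainder case analysis entirely: closed form t1 = t2 = (v+1)//3 and t3 = v - 2*t1,
-- using the invariant that the three tranches always sum to v (objective: simpler).
-- ===== PORT A =====
def divide_tranche (col : List Int) : List Int × List Int × List Int :=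
  let s := col.foldl (fun (st : List Int × List Int × List Int) x =>
    let a := PySem.Int.floordiv x 3
    if PySem.Int.mod x 3 = 1 then (st.1 ++ [a], st.2.1 ++ [a], st.2.2 ++ [a+1])
    else if PySem.Int.mod x 3 = 2 then (st.1 ++ [a+1], st.2.1 ++ [a+1], st.2.2 ++ [a])
    else (st.1 ++ [a], st.2.1 ++ [a], st.2.2 ++ [a])) ([], [], [])
  s

-- ===== PORT B =====
def divide_tranche_alt (col : List Int) : List Int × List Int × List Int :=
  let t1 := col.map (fun v => PySem.Int.floordiv (v + 1) 3)
  let t3 := (col.zip t1).map (fun p => p.1 - 2 * p.2)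
  (t1, t1, t3)

-- ===== PRECONDITION & SPEC =====
def Spec_divide_tranche (col : List Int) (out : List Int × List Int × List Int) : Prop := out = divide_tranche_alt col
instance (col : List Int) (out : List Int × List Int × List Int) : Decidable (Spec_divide_tranche col out) := by unfold Spec_divide_tranche; infer_instance

-- ===== CLAIM (what is proved, stated in full; the proofs are below) =====
def Claim_equal_divide_tranche : Prop := ∀ (col : List Int), Dom_divide_tranche col → Spec_divide_tranche col (divide_tranche col)

-- ===== LEMMAS AND PROOFS =====
theorem dt_key (col : List Int) (acc : List Int × List Int × List Int) :
    col.foldl (fun (st : List Int × List Int × List Int) x =>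
      let a := PySem.Int.floordiv x 3
      if PySem.Int.mod x 3 = 1 then (st.1 ++ [a], st.2.1 ++ [a], st.2.2 ++ [a+1])
      else if PySem.Int.mod x 3 = 2 then (st.1 ++ [a+1], st.2.1 ++ [a+1], st.2.2 ++ [a])
      else (st.1 ++ [a], st.2.1 ++ [a], st.2.2 ++ [a])) acc
    = (acc.1 ++ (divide_tranche_alt col).1,
       acc.2.1 ++ (divide_tranche_alt col).2.1,
       acc.2.2 ++ (divide_tranche_alt col).2.2) := by
  induction col generalizing acc with
  | nil => simp [divide_tranche_alt]
  | cons x xs ih =>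
    simp only [List.foldl_cons, ih, divide_tranche_alt, List.map_cons, List.zip_cons_cons]
    have hd : PySem.Int.floordiv x 3 = x / 3 := PySem.Int.floordiv_eq_ediv_of_pos (by omega)
    have hd1 : PySem.Int.floordiv (x + 1) 3 = (x + 1) / 3 := PySem.Int.floordiv_eq_ediv_of_pos (by omega)
    have hm : PySem.Int.mod x 3 = x % 3 := PySem.Int.mod_eq_emod_of_pos (by omega)
    have h : x % 3 = 0 ∨ x % 3 = 1 ∨ x % 3 = 2 := by omega
    rcases h with h | h | h <;>
      simp [hd, hd1, hm, h] <;>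
      constructor <;> omega

-- ===== VERDICT (by name: the statement is the Claim_ definition above) =====
theorem divide_tranche_spec : Claim_equal_divide_tranche := by
  intro col _
  unfold Spec_divide_tranche divide_tranche
  simpa using dt_key col ([], [], [])
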